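-- pv_equiv track=rewrite | github.com/theriex/membic | membicsys/py/dbacc.py | visible_MUser_fields
-- ===== SOURCE A (Python) =====
-- def visible_MUser_fields(obj, audience):
--     filtobj = {}
--     for fld, val in obj.items():
--         if fld == "email" and audience != "private":
--             continue
--         if fld == "phash":
--             continue
--         if fld == "status" and audience != "private":
--             continue
--         if fld == "mailbounce":
--             continue
--         if fld == "actsends":
--             continue
--         if fld == "actcode":
--             continue
--         if fld == "altinmail" and audience != "private":
--             continue
--         if fld == "profpic":
--             val = obj["dsId"]
--         filtobj[fld] = val
--     return filtobj
-- ===== SOURCE B (Python) =====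
-- def visible_MUser_fields(obj, audience):
--     filtobj = dict(obj)
--     if audience != "private":
--         for fld in ("email", "status", "altinmail"):
--             filtobj.pop(fld, None)
--     for fld in ("phash", "mailbounce", "actsends", "actcode"):
--         filtobj.pop(fld, None)
--     if "profpic" in filtobj:
--         filtobj["profpic"] = obj["dsId"]
--     return filtobj
-- ===== Notes on version B (the rewrite author's own statement) =====
-- stated objective: simpler
-- what changed: Replaces the per-field loop with continue-branches by a bulk dict copy followed by a fixed set of targeted pops and one in-place profpic override.
import Mathlib
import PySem

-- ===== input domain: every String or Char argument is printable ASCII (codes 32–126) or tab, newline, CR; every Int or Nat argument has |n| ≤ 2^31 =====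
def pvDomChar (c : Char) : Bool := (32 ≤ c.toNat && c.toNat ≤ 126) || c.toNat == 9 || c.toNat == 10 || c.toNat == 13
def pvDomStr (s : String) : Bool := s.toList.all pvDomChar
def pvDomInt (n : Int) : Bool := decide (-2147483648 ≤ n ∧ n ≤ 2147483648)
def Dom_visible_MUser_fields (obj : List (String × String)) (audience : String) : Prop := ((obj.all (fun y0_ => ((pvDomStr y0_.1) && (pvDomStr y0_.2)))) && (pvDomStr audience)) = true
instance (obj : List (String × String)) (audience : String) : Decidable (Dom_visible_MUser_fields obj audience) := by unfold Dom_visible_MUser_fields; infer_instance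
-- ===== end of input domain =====

-- B replaces A's per-field loop with continue-branches by a bulk copy plus fixed pops
-- and one profpic override; objective: simpler. Equality of return values is proved on
-- Pre_ (duplicate-free association lists, dsId present whenever profpic is).

-- ===== PORT A =====
-- loop body of A's for-loop (a helper; the branch chain is transcribed in order)
def visStep (obj : List (String × String)) (audience : String)
    (filtobj : PySem.Dict String String) (p : String × String) : PySem.Dict String String :=
  if p.1 = "email" ∧ audience ≠ "private" then filtobj
  else if p.1 = "phash" then filtobj
  else if p.1 = "status" ∧ audience ≠ "private" then filtobj
  else if p.1 = "mailbounce" then filtobj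
  else if p.1 = "actsends" then filtobj
  else if p.1 = "actcode" then filtobj
  else if p.1 = "altinmail" ∧ audience ≠ "private" then filtobj
  else
    -- obj["dsId"]: Pre_ guarantees the key is present whenever this branch reads it
    let val := if p.1 = "profpic" then (PySem.Dict.mk obj).getD "dsId" "" else p.2
    filtobj.insert p.1 val

def visible_MUser_fields (obj : List (String × String)) (audience : String) : List (String × String) :=
  (obj.foldl (visStep obj audience) PySem.Dict.empty).items

-- ===== PORT B =====
def visible_MUser_fields_alt (obj : List (String × String)) (audience : String) : List (String × String) :=
  let filtobj := PySem.Dict.mk obj           -- dict(obj)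
  let filtobj := if audience ≠ "private" then
      ["email", "status", "altinmail"].foldl PySem.Dict.erase filtobj
    else filtobj
  let filtobj := ["phash", "mailbounce", "actsends", "actcode"].foldl PySem.Dict.erase filtobj
  let filtobj := if filtobj.contains "profpic" then
      filtobj.insert "profpic" ((PySem.Dict.mk obj).getD "dsId" "")   -- obj["dsId"], key present by Pre_
    else filtobj
  filtobj.items

-- ===== PRECONDITION & SPEC =====
-- Pre_ excludes (a) association lists with duplicate keys, which do not represent any
-- Python dict (A's and B's parameter is a dict), and (b) inputs where "profpic" is a key
-- but "dsId" is not, on which both A and B raise KeyError.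
def Pre_visible_MUser_fields (obj : List (String × String)) (audience : String) : Prop :=
  (obj.map Prod.fst).Nodup ∧ ("profpic" ∈ obj.map Prod.fst → "dsId" ∈ obj.map Prod.fst)
instance (obj : List (String × String)) (audience : String) : Decidable (Pre_visible_MUser_fields obj audience) := by unfold Pre_visible_MUser_fields; infer_instance

def pvWitness_visible_MUser_fields : (List (String × String)) × String :=
  ([("dsId", "1234"), ("name", "membic"), ("email", "x@y.z"), ("profpic", "img")], "public")

def Spec_visible_MUser_fields (obj : List (String × String)) (audience : String) (out : List (String × String)) : Prop := out = visible_MUser_fields_alt obj audience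
instance (obj : List (String × String)) (audience : String) (out : List (String × String)) : Decidable (Spec_visible_MUser_fields obj audience out) := by unfold Spec_visible_MUser_fields; infer_instance

-- ===== CLAIM (what is proved, stated in full; the proofs are below) =====
def Claim_equal_visible_MUser_fields : Prop := ∀ (obj : List (String × String)) (audience : String), Dom_visible_MUser_fields obj audience → Pre_visible_MUser_fields obj audience → Spec_visible_MUser_fields obj audience (visible_MUser_fields obj audience)

-- ===== LEMMAS AND PROOFS =====

-- which fields survive the filtering, as one boolean predicate
def pvKeep (audience fld : String) : Bool :=
  !(decide (fld = "phash") || decide (fld = "mailbounce") || decide (fld = "actsends")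
    || decide (fld = "actcode")
    || (decide (audience ≠ "private")
        && (decide (fld = "email") || decide (fld = "status") || decide (fld = "altinmail"))))

-- the profpic value override, as one map
def pvRepl (obj : List (String × String)) (p : String × String) : String × String :=
  if p.1 == "profpic" then ("profpic", (PySem.Dict.mk obj).getD "dsId" "") else p

theorem visStep_eq (obj : List (String × String)) (audience : String)
    (d : PySem.Dict String String) (p : String × String) :
    visStep obj audience d p =
      if pvKeep audience p.1 then d.insert p.1 (pvRepl obj p).2 else d := by
  simp only [visStep, pvKeep, pvRepl]
  split_ifs with h1 h2 h3 h4 h5 h6 h7 h8 h9 h10 <;> simp_all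

theorem visStep_key (obj : List (String × String)) (audience : String)
    (p : String × String) (_h : pvKeep audience p.1 = true) : (pvRepl obj p).1 = p.1 := by
  simp only [pvRepl]
  split <;> simp_all

theorem foldA (obj : List (String × String)) (audience : String) :
    ∀ (l : List (String × String)) (d : PySem.Dict String String),
      (d.keys ++ l.map Prod.fst).Nodup →
      (l.foldl (visStep obj audience) d).items =
        d.items ++ (l.filter (fun p => pvKeep audience p.1)).map (pvRepl obj) := by
  intro l
  induction l with
  | nil => intro d _; simp
  | cons p l ih =>
    intro d hnd
    have hmem : p.1 ∉ d.keys := by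
      intro hm
      have := List.disjoint_of_nodup_append hnd
      exact this hm (by simp)
    have hcont : d.contains p.1 = false := by
      have := (PySem.Dict.contains_iff_mem_keys (d := d) (k := p.1))
      by_contra h
      exact hmem (this.mp (by simpa using h))
    simp only [List.foldl_cons, visStep_eq]
    by_cases hk : pvKeep audience p.1 = true
    · rw [if_pos hk]
      have hkeys : ((d.insert p.1 (pvRepl obj p).2).keys ++ l.map Prod.fst).Nodup := by
        rw [PySem.Dict.keys_insert_of_not_contains _ _ hcont, List.append_assoc]
        simpa using hnd
      rw [ih _ hkeys, PySem.Dict.items_insert_of_not_contains _ _ hcont]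
      have : (p.1, (pvRepl obj p).2) = pvRepl obj p := by
        rw [← visStep_key obj audience p hk]
      simp [hk, this]
    · rw [if_neg hk]
      have : (d.keys ++ l.map Prod.fst).Nodup := by
        have h2 : (d.keys ++ l.map Prod.fst).Sublist (d.keys ++ p.1 :: l.map Prod.fst) :=
          List.Sublist.append_left (List.sublist_cons_self _ _) _
        exact h2.nodup (by simpa using hnd)
      rw [ih _ this]
      simp [hk]

theorem A_char (obj : List (String × String)) (audience : String)
    (h : (obj.map Prod.fst).Nodup) :
    visible_MUser_fields obj audience =
      (obj.filter (fun p => pvKeep audience p.1)).map (pvRepl obj) := by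
  unfold visible_MUser_fields
  rw [foldA obj audience obj PySem.Dict.empty (by simpa [PySem.Dict.empty] using h)]
  simp [PySem.Dict.empty]

theorem B_filter (obj : List (String × String)) (audience : String) :
    ["phash", "mailbounce", "actsends", "actcode"].foldl PySem.Dict.erase
        (if audience ≠ "private" then
          ["email", "status", "altinmail"].foldl PySem.Dict.erase (PySem.Dict.mk obj)
        else PySem.Dict.mk obj) =
      PySem.Dict.mk (obj.filter (fun p => pvKeep audience p.1)) := by
  by_cases ha : audience = "private" <;>
    · simp [ha, PySem.Dict.erase, List.filter_filter]
      apply List.filter_congr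
      intro p _
      rw [Bool.eq_iff_iff]
      simp [pvKeep, ha]
      try tauto

theorem B_char (obj : List (String × String)) (audience : String) :
    visible_MUser_fields_alt obj audience =
      (obj.filter (fun p => pvKeep audience p.1)).map (pvRepl obj) := by
  simp only [visible_MUser_fields_alt]
  rw [B_filter obj audience]
  set L := obj.filter (fun p => pvKeep audience p.1) with hL
  by_cases hc : (PySem.Dict.mk L).contains "profpic" = true
  · rw [if_pos hc, PySem.Dict.items_insert_of_contains _ _ hc]
    apply List.map_congr_left
    intro p _
    simp [pvRepl]
  · rw [if_neg (by simpa using hc)]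
    have hnp : ∀ p ∈ L, p.1 ≠ "profpic" := by
      intro p hp hcontra
      apply hc
      rw [PySem.Dict.contains_iff_mem_keys]
      simp only [PySem.Dict.keys]
      exact List.mem_map.mpr ⟨p, hp, hcontra⟩
    have : L.map (pvRepl obj) = L.map id := by
      apply List.map_congr_left
      intro p hp
      simp [pvRepl, hnp p hp]
    simp [this]

-- ===== VERDICT (by name: the statement is the Claim_ definition above) =====
theorem visible_MUser_fields_spec : Claim_equal_visible_MUser_fields := by
  intro obj audience _ hpre
  unfold Spec_visible_MUser_fields
  rw [A_char obj audience hpre.1, B_char obj audience]
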